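-- pv_equiv track=rewrite | github.com/riyogarta/syne | syne/security.py | is_protected_rule
-- ===== SOURCE A (Python) =====
-- PROTECTED_RULE_PREFIXES = frozenset({
--     "SEC",   # Security rules (SEC001, SEC002, etc.)
--     "MEM",   # Memory rules (MEM001, MEM002, etc.)
--     "IDT",   # Identity rules (IDT001, etc.)
-- })
--
-- def is_protected_rule(rule_code: str) -> bool:
--     """Check if a rule code is protected from removal.
--
--     Args:
--         rule_code: The rule code (e.g., "SEC001", "MEM001")
--
--     Returns:
--         True if the rule is protected and cannot be removed
--     """
--     if not rule_code:
--         return False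
--
--     # Check if rule code starts with any protected prefix
--     rule_upper = rule_code.upper()
--     for prefix in PROTECTED_RULE_PREFIXES:
--         if rule_upper.startswith(prefix):
--             return True
--     return False
-- ===== SOURCE B (Python) =====
-- # DFA over the first three characters: integer states, one transition table,
-- # accepting states are exactly the ends of the three protected prefixes.
-- _TRANSITIONS = {
--     (0, 'S'): 1, (1, 'E'): 2, (2, 'C'): 3,   # S-E-C
--     (0, 'M'): 4, (4, 'E'): 5, (5, 'M'): 6,   # M-E-M
--     (0, 'I'): 7, (7, 'D'): 8, (8, 'T'): 9,   # I-D-T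
-- }
-- _ACCEPTING = frozenset({3, 6, 9})
--
-- def is_protected_rule(rule_code: str) -> bool:
--     state = 0
--     for ch in rule_code[:3]:
--         state = _TRANSITIONS.get((state, ch.upper()), -1)
--         if state < 0:
--             return False
--     return state in _ACCEPTING
-- ===== Notes on version B (the rewrite author's own statement) =====
-- stated objective: alternative
-- what changed: A's loop of startswith tests over a prefix set is replaced by a finite automaton: a per-character DFA walk over the first three characters with an explicit transition table and accepting states, with no string comparison or startswith at all.
import Mathlib
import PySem

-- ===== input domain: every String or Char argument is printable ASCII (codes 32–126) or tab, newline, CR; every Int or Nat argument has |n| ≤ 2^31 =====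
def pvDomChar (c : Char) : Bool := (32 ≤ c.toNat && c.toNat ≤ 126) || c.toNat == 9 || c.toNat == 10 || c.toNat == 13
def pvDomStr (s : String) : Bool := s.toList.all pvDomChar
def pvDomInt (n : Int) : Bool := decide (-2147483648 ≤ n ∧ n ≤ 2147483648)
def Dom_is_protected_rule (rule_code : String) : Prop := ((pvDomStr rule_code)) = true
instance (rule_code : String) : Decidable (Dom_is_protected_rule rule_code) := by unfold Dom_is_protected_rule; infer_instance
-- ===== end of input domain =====

-- B replaces A's startswith scan over the prefix set by a finite automaton (explicit transition table, integer states) walking the first three characters: alternative decomposition, same cost.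

-- ===== PORT A =====
-- PROTECTED_RULE_PREFIXES as a list of its distinct elements
def PROTECTED_RULE_PREFIXES : List String := ["SEC", "MEM", "IDT"]

-- the loop of startswith tests over the prefixes, with early return
def is_protected_rule (rule_code : String) : Bool :=
  if rule_code = "" then false
  else
    let rule_upper := PySem.Str.upper rule_code
    PROTECTED_RULE_PREFIXES.any (fun pfx => PySem.Str.startswith rule_upper pfx)

-- ===== PORT B =====
-- _TRANSITIONS as an association list keyed by (state, char)
def pvTransitions : List ((Int × Char) × Int) :=
  [((0, 'S'), 1), ((1, 'E'), 2), ((2, 'C'), 3),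
   ((0, 'M'), 4), ((4, 'E'), 5), ((5, 'M'), 6),
   ((0, 'I'), 7), ((7, 'D'), 8), ((8, 'T'), 9)]

-- _ACCEPTING
def pvAccepting : List Int := [3, 6, 9]

-- the for-loop with its early return, as structural recursion over the remaining characters
def pvDfaLoop (state : Int) : List Char → Bool
  | [] => pvAccepting.contains state
  | c :: cs =>
    let st := (PySem.Dict.mk pvTransitions).getD (state, PySem.Chars.upperChar c) (-1)
    if st < 0 then false else pvDfaLoop st cs

def is_protected_rule_alt (rule_code : String) : Bool :=
  pvDfaLoop 0 (PySem.Str.slice rule_code none (some 3)).toList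

-- ===== PRECONDITION & SPEC =====
def Spec_is_protected_rule (rule_code : String) (out : Bool) : Prop := out = is_protected_rule_alt rule_code
instance (rule_code : String) (out : Bool) : Decidable (Spec_is_protected_rule rule_code out) := by unfold Spec_is_protected_rule; infer_instance

-- ===== CLAIM =====
def Claim_equal_is_protected_rule : Prop := ∀ (rule_code : String), Dom_is_protected_rule rule_code → Spec_is_protected_rule rule_code (is_protected_rule rule_code)

-- ===== LEMMAS AND PROOFS =====

theorem slice3_toList (s : String) :
    (PySem.Str.slice s none (some 3)).toList = s.toList.take 3 := by
  have := PySem.List.slice_to (xs := s.toList) (b := 3) (by norm_num)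
  simpa [PySem.Str.toList_slice] using this

-- transition-table lookups, one lemma per live state
theorem lk0 (x : Char) : (PySem.Dict.mk pvTransitions).getD ((0 : Int), x) (-1) =
    (if x = 'S' then 1 else if x = 'M' then 4 else if x = 'I' then 7 else -1) := by
  simp only [pvTransitions, PySem.Dict.getD, PySem.Dict.get?]
  split_ifs with h1 h2 h3 <;> simp_all [Prod.mk.injEq, Ne.symm]

theorem lk1 (x : Char) : (PySem.Dict.mk pvTransitions).getD ((1 : Int), x) (-1) =
    (if x = 'E' then 2 else -1) := by
  simp only [pvTransitions, PySem.Dict.getD, PySem.Dict.get?]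
  split_ifs with h1 <;> simp_all [Prod.mk.injEq, Ne.symm]

theorem lk2 (x : Char) : (PySem.Dict.mk pvTransitions).getD ((2 : Int), x) (-1) =
    (if x = 'C' then 3 else -1) := by
  simp only [pvTransitions, PySem.Dict.getD, PySem.Dict.get?]
  split_ifs with h1 <;> simp_all [Prod.mk.injEq, Ne.symm]

theorem lk4 (x : Char) : (PySem.Dict.mk pvTransitions).getD ((4 : Int), x) (-1) =
    (if x = 'E' then 5 else -1) := by
  simp only [pvTransitions, PySem.Dict.getD, PySem.Dict.get?]
  split_ifs with h1 <;> simp_all [Prod.mk.injEq, Ne.symm]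

theorem lk5 (x : Char) : (PySem.Dict.mk pvTransitions).getD ((5 : Int), x) (-1) =
    (if x = 'M' then 6 else -1) := by
  simp only [pvTransitions, PySem.Dict.getD, PySem.Dict.get?]
  split_ifs with h1 <;> simp_all [Prod.mk.injEq, Ne.symm]

theorem lk7 (x : Char) : (PySem.Dict.mk pvTransitions).getD ((7 : Int), x) (-1) =
    (if x = 'D' then 8 else -1) := by
  simp only [pvTransitions, PySem.Dict.getD, PySem.Dict.get?]
  split_ifs with h1 <;> simp_all [Prod.mk.injEq, Ne.symm]

theorem lk8 (x : Char) : (PySem.Dict.mk pvTransitions).getD ((8 : Int), x) (-1) =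
    (if x = 'T' then 9 else -1) := by
  simp only [pvTransitions, PySem.Dict.getD, PySem.Dict.get?]
  split_ifs with h1 <;> simp_all [Prod.mk.injEq, Ne.symm]

-- B on one character never accepts
theorem dfa_one (a : Char) : pvDfaLoop 0 [a] = false := by
  simp only [pvDfaLoop, lk0]
  split_ifs <;> rfl

-- B on two characters never accepts
theorem dfa_two (a b : Char) : pvDfaLoop 0 [a, b] = false := by
  simp only [pvDfaLoop, lk0]
  split_ifs
  all_goals try simp_all only [lk1, lk4, lk7]
  all_goals try split_ifs at *
  all_goals simp_all [pvAccepting]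

-- B on three characters accepts exactly when their uppercased form is one of the three prefixes
theorem dfa_three (a b c : Char) : pvDfaLoop 0 [a, b, c] =
    (decide (PySem.Chars.upperChar a = 'S' ∧ PySem.Chars.upperChar b = 'E' ∧ PySem.Chars.upperChar c = 'C') ||
     decide (PySem.Chars.upperChar a = 'M' ∧ PySem.Chars.upperChar b = 'E' ∧ PySem.Chars.upperChar c = 'M') ||
     decide (PySem.Chars.upperChar a = 'I' ∧ PySem.Chars.upperChar b = 'D' ∧ PySem.Chars.upperChar c = 'T')) := by
  simp only [pvDfaLoop, lk0]
  split_ifs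
  all_goals try simp_all only [lk1, lk4, lk7]
  all_goals try split_ifs at *
  all_goals try simp_all only [lk2, lk5, lk8]
  all_goals try split_ifs at *
  all_goals simp_all [pvAccepting]

-- A's startswith with a 3-char prefix, on a string of ≥ 3 characters
theorem sw3 (p1 p2 p3 a b c : Char) (rest : List Char) :
    PySem.Chars.startswith (PySem.Chars.upper (a :: b :: c :: rest)) [p1, p2, p3] =
      decide (PySem.Chars.upperChar a = p1 ∧ PySem.Chars.upperChar b = p2 ∧ PySem.Chars.upperChar c = p3) := by
  rw [Bool.eq_iff_iff, PySem.Chars.startswith_iff, decide_eq_true_iff]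
  simp only [PySem.Chars.upper, List.map_cons, List.cons_prefix_cons, List.nil_prefix, and_true]
  constructor
  · rintro ⟨x, y, z⟩; exact ⟨x.symm, y.symm, z.symm⟩
  · rintro ⟨x, y, z⟩; exact ⟨x.symm, y.symm, z.symm⟩

-- A's startswith with a 3-char prefix is false on strings shorter than 3 characters
theorem sw_short (p1 p2 p3 : Char) (l : List Char) (h : l.length < 3) :
    PySem.Chars.startswith (PySem.Chars.upper l) [p1, p2, p3] = false := by
  rw [Bool.eq_iff_iff]
  constructor
  · intro hp
    rw [PySem.Chars.startswith_iff] at hp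
    have := hp.length_le
    simp [PySem.Chars.upper] at this
    omega
  · intro hf; exact absurd hf (by simp)

-- ===== VERDICT =====
theorem is_protected_rule_spec : Claim_equal_is_protected_rule := by
  intro s _
  unfold Spec_is_protected_rule is_protected_rule_alt
  rw [slice3_toList]
  match hl : s.toList with
  | [] =>
    have hs : s = "" := by
      have := congrArg String.ofList hl; simpa using this
    subst hs
    simp [is_protected_rule, pvDfaLoop, pvAccepting]
  | [a] =>
    have hne : s ≠ "" := fun h => by subst h; simp at hl
    simp only [is_protected_rule, if_neg hne, PROTECTED_RULE_PREFIXES, List.any_cons,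
      List.any_nil, Bool.or_false, PySem.Str.startswith_eq, PySem.Str.toList_upper, hl,
      List.take, dfa_one]
    rw [show ("SEC".toList) = ['S','E','C'] from rfl, show ("MEM".toList) = ['M','E','M'] from rfl,
       show ("IDT".toList) = ['I','D','T'] from rfl]
    simp [sw_short]
  | [a, b] =>
    have hne : s ≠ "" := fun h => by subst h; simp at hl
    simp only [is_protected_rule, if_neg hne, PROTECTED_RULE_PREFIXES, List.any_cons,
      List.any_nil, Bool.or_false, PySem.Str.startswith_eq, PySem.Str.toList_upper, hl,
      List.take, dfa_two]
    rw [show ("SEC".toList) = ['S','E','C'] from rfl, show ("MEM".toList) = ['M','E','M'] from rfl,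
       show ("IDT".toList) = ['I','D','T'] from rfl]
    simp [sw_short]
  | a :: b :: c :: rest =>
    have hne : s ≠ "" := fun h => by subst h; simp at hl
    simp only [is_protected_rule, if_neg hne, PROTECTED_RULE_PREFIXES, List.any_cons,
      List.any_nil, Bool.or_false, PySem.Str.startswith_eq, PySem.Str.toList_upper, hl,
      List.take, dfa_three]
    rw [show ("SEC".toList) = ['S','E','C'] from rfl, show ("MEM".toList) = ['M','E','M'] from rfl,
       show ("IDT".toList) = ['I','D','T'] from rfl,
       sw3, sw3, sw3, Bool.or_assoc]
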